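-- pv_equiv track=rewrite | github.com/NoviSystems/yurika | mortar/management/commands/taskctl.py | side_by_side
-- ===== SOURCE A (Python) =====
-- def side_by_side(left, right, spacer=8):
--     """
--     Format two blocks of text to display side-by-side.
--
--     It is assumed that each block of text is consistent in width.
--     """
--     left = left.split('\n')
--     right = right.split('\n')
--
--     # total number of lines
--     lines = max(len(left), len(right))
--     spacers = [' ' * spacer] * lines
--
--     # add blank lines to left side
--     blank = ' ' * len(left[0])
--     left.extend([blank] * (lines - len(left)))
--
--     # add blank lines to right side
--     blank = ' ' * len(right[0])
--     right.extend([blank] * (lines - len(right)))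
--
--     return '\n'.join([''.join(parts) for parts in zip(left, spacers, right)])
-- ===== SOURCE B (Python) =====
-- def side_by_side(left, right, spacer=8):
--     """
--     Format two blocks of text to display side-by-side.
--
--     It is assumed that each block of text is consistent in width.
--     """
--     gap = ' ' * spacer
--     ls = left.split('\n')
--     rs = right.split('\n')
--     lblank = ' ' * len(ls[0])
--     rblank = ' ' * len(rs[0])
--
--     # treat the line lists as stacks: reverse, then pop a line (or a blank
--     # stand-in when a stack has run dry) off each side per output row
--     a = ls[::-1]
--     b = rs[::-1]
--     out = (a.pop() if a else lblank) + gap + (b.pop() if b else rblank)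
--     while a or b:
--         out += '\n' + (a.pop() if a else lblank) + gap + (b.pop() if b else rblank)
--     return out
-- ===== Notes on version B (the rewrite author's own statement) =====
-- stated objective: alternative
-- what changed: Replaces A's staged construction (compute max line count, build a spacers list, extend both lists with blanks, zip triples, join) by a stack-based merge: both line lists are reversed and a while loop pops one line (or a blank stand-in) off each stack per row, accumulating the output string directly with no max/extend/zip/join.
import Mathlib
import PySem

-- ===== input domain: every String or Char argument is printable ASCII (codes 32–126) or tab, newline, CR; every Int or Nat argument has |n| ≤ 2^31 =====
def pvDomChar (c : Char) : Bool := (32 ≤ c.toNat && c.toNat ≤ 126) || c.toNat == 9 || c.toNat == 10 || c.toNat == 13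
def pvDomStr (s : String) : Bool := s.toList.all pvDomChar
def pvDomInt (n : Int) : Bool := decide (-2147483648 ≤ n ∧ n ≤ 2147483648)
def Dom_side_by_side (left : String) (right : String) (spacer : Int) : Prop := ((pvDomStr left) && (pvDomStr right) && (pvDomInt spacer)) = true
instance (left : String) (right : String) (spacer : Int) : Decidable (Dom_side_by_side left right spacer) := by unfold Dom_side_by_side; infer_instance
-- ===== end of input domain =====

-- B replaces A's staged max/spacers/extend/zip/join construction by a stack-based merge:
-- reverse both line lists and pop a line (or blank stand-in) off each per row, accumulating
-- the output string directly; objective: alternative algorithm, same cost. Equal everywhere.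
-- B mutates only its own local lists; neither program mutates an argument.

-- ===== PORT A =====
-- split('\n') never raises ("\n" ≠ ""), so .getD [] is never taken; split also never
-- returns [], so left[0]/right[0] (ported as pyGetD _ 0 "") never raises an IndexError.
def side_by_side (left : String) (right : String) (spacer : Int) : String :=
  let leftL := (PySem.Str.split? left "\n").getD []
  let rightL := (PySem.Str.split? right "\n").getD []
  -- total number of lines
  let lines := max leftL.length rightL.length
  let spacers := List.replicate lines (String.ofList (List.replicate spacer.toNat ' '))
  -- add blank lines to left side
  let blankL := String.ofList (List.replicate (PySem.Str.len (PySem.List.pyGetD leftL 0 "")).toNat ' ')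
  let leftL := leftL ++ List.replicate (lines - leftL.length) blankL
  -- add blank lines to right side
  let blankR := String.ofList (List.replicate (PySem.Str.len (PySem.List.pyGetD rightL 0 "")).toNat ' ')
  let rightL := rightL ++ List.replicate (lines - rightL.length) blankR
  PySem.Str.join "\n"
    ((leftL.zip (spacers.zip rightL)).map (fun p => PySem.Str.join "" [p.1, p.2.1, p.2.2]))

-- ===== PORT B =====
-- Source B's 'x.pop() if x else blank': the popped last element (or the blank) and the rest
def sbsPop (blank : String) (a : List String) : String × List String :=
  match a.getLast? with
  | none => (blank, a)
  | some x => (x, a.dropLast)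

-- Source B's while loop: pop one line off each stack per row, extending the output string
def sbsLoop (lblank rblank gap : String) (a b : List String) (out : String) : String :=
  if a = [] ∧ b = [] then out
  else
    let pa := sbsPop lblank a
    let pb := sbsPop rblank b
    sbsLoop lblank rblank gap pa.2 pb.2 (out ++ "\n" ++ (pa.1 ++ gap ++ pb.1))
termination_by a.length + b.length
decreasing_by cases a using List.reverseRecOn <;> cases b using List.reverseRecOn <;>
  simp_all [sbsPop] <;> omega

def side_by_side_alt (left : String) (right : String) (spacer : Int) : String :=
  let gap := String.ofList (List.replicate spacer.toNat ' ')
  let ls := (PySem.Str.split? left "\n").getD []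
  let rs := (PySem.Str.split? right "\n").getD []
  let lblank := String.ofList (List.replicate (PySem.Str.len (PySem.List.pyGetD ls 0 "")).toNat ' ')
  let rblank := String.ofList (List.replicate (PySem.Str.len (PySem.List.pyGetD rs 0 "")).toNat ' ')
  let a := ls.reverse
  let b := rs.reverse
  let pa := sbsPop lblank a
  let pb := sbsPop rblank b
  sbsLoop lblank rblank gap pa.2 pb.2 (pa.1 ++ gap ++ pb.1)

-- ===== PRECONDITION & SPEC =====
def Spec_side_by_side (left : String) (right : String) (spacer : Int) (out : String) : Prop := out = side_by_side_alt left right spacer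
instance (left : String) (right : String) (spacer : Int) (out : String) : Decidable (Spec_side_by_side left right spacer out) := by unfold Spec_side_by_side; infer_instance

-- ===== CLAIM (what is proved, stated in full; the proofs are below) =====
def Claim_equal_side_by_side : Prop := ∀ (left : String) (right : String) (spacer : Int), Dom_side_by_side left right spacer → Spec_side_by_side left right spacer (side_by_side left right spacer)

-- ===== LEMMAS AND PROOFS =====

-- the common row list both programs realise
def pvRows (lb rb gap : String) (L R : List String) : List String :=
  (List.range (max L.length R.length)).map
    (fun i => (if _ : i < L.length then L[i] else lb) ++ gap ++
              (if _ : i < R.length then R[i] else rb))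

-- ''.join([l, sp, r]) is l + sp + r
lemma pv_join3 (a b c : String) : PySem.Str.join "" [a, b, c] = a ++ b ++ c := by
  apply String.toList_injective
  simp [PySem.Str.toList_join, PySem.Chars.join, List.intercalate]

-- A's padded zip produces exactly pvRows
lemma pv_rows_eq (L R : List String) (gap bl br : String) :
    ((L ++ List.replicate (max L.length R.length - L.length) bl).zip
       ((List.replicate (max L.length R.length) gap).zip
          (R ++ List.replicate (max L.length R.length - R.length) br))).map
        (fun p => PySem.Str.join "" [p.1, p.2.1, p.2.2])
    = pvRows bl br gap L R := by
  apply List.ext_getElem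
  · simp [pvRows]
  · intro i h1 h2
    simp only [pvRows, List.getElem_map, List.getElem_zip, List.getElem_range, pv_join3]
    rcases Nat.lt_or_ge i L.length with hL | hL <;> rcases Nat.lt_or_ge i R.length with hR | hR <;>
      simp [hL, hR, Nat.not_lt.mpr, List.getElem_replicate]

lemma pv_rows_cons_cons (lb rb gap a b : String) (as bs : List String) :
    pvRows lb rb gap (a :: as) (b :: bs) = (a ++ gap ++ b) :: pvRows lb rb gap as bs := by
  simp [pvRows, Nat.succ_max_succ, List.range_succ_eq_map, List.map_map, Function.comp]

lemma pv_rows_cons_nil (lb rb gap a : String) (as : List String) :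
    pvRows lb rb gap (a :: as) [] = (a ++ gap ++ rb) :: pvRows lb rb gap as [] := by
  simp [pvRows, List.range_succ_eq_map, List.map_map, Function.comp]

lemma pv_rows_nil_cons (lb rb gap b : String) (bs : List String) :
    pvRows lb rb gap [] (b :: bs) = (lb ++ gap ++ b) :: pvRows lb rb gap [] bs := by
  simp [pvRows, List.range_succ_eq_map, List.map_map, Function.comp]

lemma pv_join_singleton (x : String) : PySem.Str.join "\n" [x] = x := by
  apply String.toList_injective
  simp [PySem.Str.toList_join, PySem.Chars.join, List.intercalate]

lemma pv_join_cons (x y : String) (ys : List String) :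
    PySem.Str.join "\n" (x :: y :: ys) = x ++ "\n" ++ PySem.Str.join "\n" (y :: ys) := by
  apply String.toList_injective
  simp [PySem.Str.toList_join, PySem.Chars.join, List.intercalate]

-- sbsLoop over reversed lists folds the remaining rows onto the accumulator
lemma pv_loop_eq (lb rb gap : String) :
    ∀ (n : ℕ) (L R : List String), L.length + R.length = n → ∀ (out : String),
      sbsLoop lb rb gap L.reverse R.reverse out
        = List.foldl (fun acc row => acc ++ "\n" ++ row) out (pvRows lb rb gap L R) := by
  intro n
  induction n using Nat.strong_induction_on with
  | _ n ih =>
    intro L R hn out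
    match L, R with
    | [], [] => rw [sbsLoop]; simp [pvRows]
    | x :: xs, y :: ys =>
      rw [sbsLoop]
      rw [if_neg (by simp)]
      simp only [sbsPop, List.getLast?_reverse, List.dropLast_reverse, List.head?_cons,
        List.tail_cons]
      rw [ih (xs.length + ys.length) (by simp at hn; omega) xs ys rfl]
      rw [pv_rows_cons_cons, List.foldl_cons]
    | x :: xs, [] =>
      rw [sbsLoop]
      rw [if_neg (by simp)]
      simp only [sbsPop, List.getLast?_reverse, List.dropLast_reverse, List.head?_cons,
        List.getLast?_nil, List.tail_cons, List.reverse_nil]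
      have h2 := ih xs.length (by simp at hn; omega) xs [] (by simp)
          (out ++ "\n" ++ (x ++ gap ++ rb))
      simp only [List.reverse_nil] at h2
      rw [h2, pv_rows_cons_nil, List.foldl_cons]
    | [], y :: ys =>
      rw [sbsLoop]
      rw [if_neg (by simp)]
      simp only [sbsPop, List.getLast?_reverse, List.dropLast_reverse, List.head?_cons,
        List.getLast?_nil, List.tail_cons, List.reverse_nil]
      have h2 := ih ys.length (by simp at hn; omega) [] ys (by simp)
          (out ++ "\n" ++ (lb ++ gap ++ y))
      simp only [List.reverse_nil] at h2
      rw [h2, pv_rows_nil_cons, List.foldl_cons]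

-- prepending distributes over the row fold
lemma pv_foldl_prepend (p : String) : ∀ (ys : List String) (init : String),
    p ++ List.foldl (fun acc row => acc ++ "\n" ++ row) init ys
      = List.foldl (fun acc row => acc ++ "\n" ++ row) (p ++ init) ys := by
  intro ys
  induction ys with
  | nil => simp
  | cons z zs ih =>
    intro init
    simp only [List.foldl_cons]
    rw [ih (init ++ "\n" ++ z)]
    simp [String.append_assoc]

-- '\n'.join(r :: rest) is the same fold
lemma pv_join_eq_foldl (r : String) (rest : List String) :
    PySem.Str.join "\n" (r :: rest)
      = List.foldl (fun acc row => acc ++ "\n" ++ row) r rest := by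
  induction rest generalizing r with
  | nil => simp [pv_join_singleton]
  | cons y ys ih =>
    rw [pv_join_cons, List.foldl_cons, ih y]
    exact pv_foldl_prepend (r ++ "\n") ys y

-- splitOn.go always returns at least one piece
lemma pv_go_ne_nil (sep : List Char) : ∀ (fuel : ℕ) (l cur : List Char) (acc : List (List Char)),
    PySem.Chars.splitOn.go sep fuel l cur acc ≠ [] := by
  intro fuel
  induction fuel with
  | zero => intro l cur acc; simp [PySem.Chars.splitOn.go]
  | succ n ih =>
    intro l cur acc
    cases l with
    | nil => simp [PySem.Chars.splitOn.go]
    | cons c rest =>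
      rw [PySem.Chars.splitOn.go]
      split
      · exact ih _ _ _
      · exact ih _ _ _

-- split?(s, "\n") never yields the empty list
lemma pv_split_ne_nil (s : String) : (PySem.Str.split? s "\n").getD [] ≠ [] := by
  simp only [PySem.Str.split?, PySem.Chars.split?, PySem.Chars.splitOn]
  norm_num
  intro h
  exact pv_go_ne_nil _ _ _ _ _ (by simpa using h)

-- ===== VERDICT (by name: the statement is the Claim_ definition above) =====
theorem side_by_side_spec : Claim_equal_side_by_side := by
  intro left right spacer _
  unfold Spec_side_by_side side_by_side side_by_side_alt
  simp only [pv_rows_eq]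
  obtain ⟨x, xs, hx⟩ := List.exists_cons_of_ne_nil (pv_split_ne_nil left)
  obtain ⟨y, ys, hy⟩ := List.exists_cons_of_ne_nil (pv_split_ne_nil right)
  rw [hx, hy]
  simp only [sbsPop, List.getLast?_reverse, List.dropLast_reverse, List.head?_cons,
    List.tail_cons]
  rw [pv_loop_eq _ _ _ (xs.length + ys.length) xs ys rfl]
  rw [pv_rows_cons_cons, pv_join_eq_foldl]
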